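-- pv_equiv track=rewrite | github.com/exponere-J/epos_mcp | content/lab/spark_to_brief.py | _template_convert
-- ===== SOURCE A (Python) =====
-- def _template_convert(content: str, tags: list) -> dict:
--     """Fallback: template-based brief construction."""
--     # Detect angle from content
--     content_lower = content.lower()
--     if any(w in content_lower for w in ["stop", "don't", "wrong", "most people"]):
--         angle = "challenger"
--     elif any(w in content_lower for w in ["build", "create", "system", "framework"]):
--         angle = "architect"
--     elif any(w in content_lower for w in ["protect", "care", "serve", "help"]):
--         angle = "steward"
--     else:
--         angle = "educator"
--
--     # Detect hook type
--     if "?" in content: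
--         hook = "question"
--     elif any(w in content_lower for w in ["top", "best", "worst", "5 ", "3 ", "10 "]):
--         hook = "list"
--     elif any(w in content_lower for w in ["how to", "how do", "step"]):
--         hook = "how_to"
--     else:
--         hook = "controversy"
--
--     return {
--         "angle_type": angle,
--         "hook_type": hook,
--         "visual_mask": "glitch" if angle == "challenger" else "schematic",
--         "script_premise": content[:150],
--         "hook_line": content[:80],
--         "cta": "Link in description.",
--     }
-- ===== SOURCE B (Python) =====
-- # One left-to-right sweep over the lowered text: at each position check which
-- # keywords start there (naive multi-pattern scan), collecting the set of matched
-- # labels; the angle/hook are then chosen from that set by priority order.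
-- _KEYWORDS = [
--     ("stop", "challenger"), ("don't", "challenger"), ("wrong", "challenger"), ("most people", "challenger"),
--     ("build", "architect"), ("create", "architect"), ("system", "architect"), ("framework", "architect"),
--     ("protect", "steward"), ("care", "steward"), ("serve", "steward"), ("help", "steward"),
--     ("top", "list"), ("best", "list"), ("worst", "list"), ("5 ", "list"), ("3 ", "list"), ("10 ", "list"),
--     ("how to", "how_to"), ("how do", "how_to"), ("step", "how_to"),
-- ]
--
--
-- def _template_convert(content: str, tags: list) -> dict:
--     low = content.lower()
--     found = set()
--     for i in range(len(low)):
--         for kw, label in _KEYWORDS: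
--             if low.startswith(kw, i):
--                 found.add(label)
--     angle = next((a for a in ("challenger", "architect", "steward") if a in found), "educator")
--     if "?" in content:
--         hook = "question"
--     else:
--         hook = next((h for h in ("list", "how_to") if h in found), "controversy")
--     return {
--         "angle_type": angle,
--         "hook_type": hook,
--         "visual_mask": "glitch" if angle == "challenger" else "schematic",
--         "script_premise": content[:150],
--         "hook_line": content[:80],
--         "cta": "Link in description.",
--     }
-- ===== Notes on version B (the rewrite author's own statement) =====
-- stated objective: alternative
-- what changed: B replaces A's per-keyword substring-search chains with one left-to-right sweep of the lowered text that checks every keyword of a flat keyword->label table at each position, accumulating the set of matched labels, from which angle and hook are picked by priority order.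
import Mathlib
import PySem

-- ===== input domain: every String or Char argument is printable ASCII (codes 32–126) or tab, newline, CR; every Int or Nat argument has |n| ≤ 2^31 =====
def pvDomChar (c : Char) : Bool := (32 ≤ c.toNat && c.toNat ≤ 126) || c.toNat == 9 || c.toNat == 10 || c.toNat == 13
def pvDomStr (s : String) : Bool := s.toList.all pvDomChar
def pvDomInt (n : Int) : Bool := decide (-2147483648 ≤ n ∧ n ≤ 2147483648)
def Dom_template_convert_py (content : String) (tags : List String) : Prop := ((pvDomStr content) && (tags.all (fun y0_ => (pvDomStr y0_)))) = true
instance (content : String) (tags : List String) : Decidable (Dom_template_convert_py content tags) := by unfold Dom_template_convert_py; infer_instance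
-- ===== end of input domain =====

-- B replaces A's per-keyword substring-search chains with one sweep over the lowered text
-- that checks every keyword of a flat keyword→label table at each position, collecting the
-- set of matched labels, from which angle and hook are picked by priority (alternative, same cost).

-- ===== PORT A =====
def template_convert_py (content : String) (tags : List String) : List (String × String) :=
  let content_lower := PySem.Str.lower content
  let angle :=
    if ["stop", "don't", "wrong", "most people"].any (fun w => PySem.Str.isIn w content_lower) then "challenger"
    else if ["build", "create", "system", "framework"].any (fun w => PySem.Str.isIn w content_lower) then "architect"
    else if ["protect", "care", "serve", "help"].any (fun w => PySem.Str.isIn w content_lower) then "steward"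
    else "educator"
  let hook :=
    if PySem.Str.isIn "?" content then "question"
    else if ["top", "best", "worst", "5 ", "3 ", "10 "].any (fun w => PySem.Str.isIn w content_lower) then "list"
    else if ["how to", "how do", "step"].any (fun w => PySem.Str.isIn w content_lower) then "how_to"
    else "controversy"
  [("angle_type", angle),
   ("hook_type", hook),
   ("visual_mask", if angle = "challenger" then "glitch" else "schematic"),
   ("script_premise", PySem.Str.slice content none (some 150)),
   ("hook_line", PySem.Str.slice content none (some 80)),
   ("cta", "Link in description.")]

-- ===== PORT B =====
def pvKeywords : List (String × String) :=
  [("stop", "challenger"), ("don't", "challenger"), ("wrong", "challenger"), ("most people", "challenger"),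
   ("build", "architect"), ("create", "architect"), ("system", "architect"), ("framework", "architect"),
   ("protect", "steward"), ("care", "steward"), ("serve", "steward"), ("help", "steward"),
   ("top", "list"), ("best", "list"), ("worst", "list"), ("5 ", "list"), ("3 ", "list"), ("10 ", "list"),
   ("how to", "how_to"), ("how do", "how_to"), ("step", "how_to")]

-- low.startswith(kw, i) on the admitted ASCII domain = kw.toList <+: low.toList.drop i (ported by hand, exact)
def template_convert_py_alt (content : String) (tags : List String) : List (String × String) :=
  let low := (PySem.Str.lower content).toList
  let found : PySem.Set String :=
    (List.range low.length).foldl (fun acc i =>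
      pvKeywords.foldl (fun a p =>
        if p.1.toList.isPrefixOf (low.drop i) then PySem.Set.add a p.2 else a) acc)
      PySem.Set.empty
  let angle := ((["challenger", "architect", "steward"].find? (fun a => PySem.Set.contains found a)).getD "educator")
  let hook :=
    if PySem.Str.isIn "?" content then "question"
    else ((["list", "how_to"].find? (fun h => PySem.Set.contains found h)).getD "controversy")
  [("angle_type", angle),
   ("hook_type", hook),
   ("visual_mask", if angle = "challenger" then "glitch" else "schematic"),
   ("script_premise", PySem.Str.slice content none (some 150)),
   ("hook_line", PySem.Str.slice content none (some 80)),
   ("cta", "Link in description.")]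

-- ===== PRECONDITION & SPEC =====
def Spec_template_convert_py (content : String) (tags : List String) (out : List (String × String)) : Prop := out = template_convert_py_alt content tags
instance (content : String) (tags : List String) (out : List (String × String)) : Decidable (Spec_template_convert_py content tags out) := by unfold Spec_template_convert_py; infer_instance

-- ===== CLAIM (what is proved, stated in full; the proofs are below) =====
def Claim_equal_template_convert_py : Prop := ∀ (content : String) (tags : List String), Dom_template_convert_py content tags → Spec_template_convert_py content tags (template_convert_py content tags)

-- ===== LEMMAS AND PROOFS =====

-- membership in the inner fold over the keyword table
theorem pv_mem_inner (cs : List Char) (ps : List (String × String)) (acc : PySem.Set String) (l : String) :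
    l ∈ ps.foldl (fun a p => if p.1.toList.isPrefixOf cs then PySem.Set.add a p.2 else a) acc ↔
      l ∈ acc ∨ ∃ p, p ∈ ps ∧ p.1.toList <+: cs ∧ p.2 = l := by
  induction ps generalizing acc with
  | nil => simp
  | cons p rest ih =>
      rw [List.foldl_cons]
      rcases hb : p.1.toList.isPrefixOf cs with _ | _
      · have hnp : ¬ p.1.toList <+: cs := by
          rw [← List.isPrefixOf_iff_prefix, hb]; exact Bool.false_ne_true
        rw [if_neg (fun hh => Bool.false_ne_true hh), ih]
        constructor
        · rintro (h1 | ⟨q, hq, hpre, hql⟩)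
          · exact Or.inl h1
          · exact Or.inr ⟨q, List.mem_cons_of_mem _ hq, hpre, hql⟩
        · rintro (h1 | ⟨q, hq, hpre, hql⟩)
          · exact Or.inl h1
          · rcases List.mem_cons.mp hq with rfl | hq'
            · exact absurd hpre hnp
            · exact Or.inr ⟨q, hq', hpre, hql⟩
      · have hp : p.1.toList <+: cs := List.isPrefixOf_iff_prefix.mp hb
        rw [if_pos rfl, ih]
        constructor
        · rintro (h1 | ⟨q, hq, hpre, hql⟩)
          · rcases (PySem.Set.mem_add _ _ _).mp h1 with h2 | h2
            · exact Or.inl h2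
            · exact Or.inr ⟨p, List.mem_cons_self, hp, h2.symm⟩
          · exact Or.inr ⟨q, List.mem_cons_of_mem _ hq, hpre, hql⟩
        · rintro (h1 | ⟨q, hq, hpre, hql⟩)
          · exact Or.inl ((PySem.Set.mem_add _ _ _).mpr (Or.inl h1))
          · rcases List.mem_cons.mp hq with rfl | hq'
            · exact Or.inl ((PySem.Set.mem_add _ _ _).mpr (Or.inr hql.symm))
            · exact Or.inr ⟨q, hq', hpre, hql⟩

-- membership in the outer fold over the positions
theorem pv_mem_found (low : List Char) (is : List Nat) (acc : PySem.Set String) (l : String) :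
    l ∈ is.foldl (fun acc i =>
        pvKeywords.foldl (fun a p => if p.1.toList.isPrefixOf (low.drop i) then PySem.Set.add a p.2 else a) acc) acc ↔
      l ∈ acc ∨ ∃ i, i ∈ is ∧ ∃ p, p ∈ pvKeywords ∧ p.1.toList <+: low.drop i ∧ p.2 = l := by
  induction is generalizing acc with
  | nil => simp
  | cons i rest ih =>
      rw [List.foldl_cons, ih]
      constructor
      · rintro (h1 | ⟨j, hj, hp⟩)
        · rcases (pv_mem_inner (low.drop i) pvKeywords acc l).mp h1 with h2 | h2
          · exact Or.inl h2
          · exact Or.inr ⟨i, List.mem_cons_self, h2⟩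
        · exact Or.inr ⟨j, List.mem_cons_of_mem _ hj, hp⟩
      · rintro (h1 | ⟨j, hj, hp⟩)
        · exact Or.inl ((pv_mem_inner (low.drop i) pvKeywords acc l).mpr (Or.inl h1))
        · rcases List.mem_cons.mp hj with rfl | hj'
          · exact Or.inl ((pv_mem_inner (low.drop j) pvKeywords acc l).mpr (Or.inr hp))
          · exact Or.inr ⟨j, hj', hp⟩

-- a nonempty keyword matching somewhere matches at a position below the length
theorem pv_exists_lt_iff (kw : List Char) (hk : kw ≠ []) (low : List Char) :
    (∃ i, i ∈ List.range low.length ∧ kw <+: low.drop i) ↔ PySem.Chars.isIn kw low = true := by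
  rw [← PySem.Chars.exists_prefix_drop_iff_isIn]
  constructor
  · rintro ⟨i, _, h⟩; exact ⟨i, h⟩
  · rintro ⟨j, h⟩
    by_cases hj : j < low.length
    · exact ⟨j, List.mem_range.mpr hj, h⟩
    · exfalso
      have hnil : low.drop j = [] := List.drop_eq_nil_of_le (Nat.le_of_not_lt hj)
      rw [hnil] at h
      exact hk (List.prefix_nil.mp h)

-- label-membership in B's found set ↔ some table keyword with this label occurs in the lowered text
theorem pv_found_label (content : String) (l : String) :
    (PySem.Set.contains
      ((List.range (PySem.Str.lower content).toList.length).foldl (fun acc i =>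
        pvKeywords.foldl (fun a p =>
          if p.1.toList.isPrefixOf ((PySem.Str.lower content).toList.drop i) then PySem.Set.add a p.2 else a) acc)
        PySem.Set.empty) l) = true ↔
      ∃ p, p ∈ pvKeywords ∧ p.2 = l ∧ PySem.Chars.isIn p.1.toList (PySem.Str.lower content).toList = true := by
  rw [PySem.Set.contains_iff, pv_mem_found]
  constructor
  · rintro (h | ⟨i, hi, p, hp, hpre, hpl⟩)
    · simp [PySem.Set.empty] at h
    · refine ⟨p, hp, hpl, ?_⟩
      rw [← PySem.Chars.exists_prefix_drop_iff_isIn]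
      exact ⟨i, hpre⟩
  · rintro ⟨p, hp, hpl, hin⟩
    have hk : p.1.toList ≠ [] := by
      fin_cases hp <;> decide
    rcases (pv_exists_lt_iff p.1.toList hk _).mpr hin with ⟨i, hi, hpre⟩
    exact Or.inr ⟨i, hi, p, hp, hpre, hpl⟩

-- Str.isIn equals the Chars-level test on toList
theorem pv_str_isIn (w s : String) :
    PySem.Str.isIn w s = PySem.Chars.isIn w.toList s.toList := by
  rcases h : PySem.Chars.isIn w.toList s.toList with _ | _
  · rw [PySem.Chars.isIn_eq_false_iff] at h
    rcases h2 : PySem.Str.isIn w s with _ | _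
    · rfl
    · exact absurd ((PySem.Str.isIn_iff_infix w s).mp h2) h
  · exact (PySem.Str.isIn_iff_infix w s).mpr ((PySem.Chars.isIn_iff_infix w.toList s.toList).mp h)

-- per-label: B's set-membership bool = A's List.any test (ws = the table keywords carrying label l)
theorem pv_label_eq (content : String) (l : String) (ws : List String)
    (h1 : ∀ w ∈ ws, (w, l) ∈ pvKeywords)
    (h2 : ∀ p ∈ pvKeywords, p.2 = l → p.1 ∈ ws) :
    (PySem.Set.contains
      ((List.range (PySem.Str.lower content).toList.length).foldl (fun acc i =>
        pvKeywords.foldl (fun a p =>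
          if p.1.toList.isPrefixOf ((PySem.Str.lower content).toList.drop i) then PySem.Set.add a p.2 else a) acc)
        PySem.Set.empty) l) = ws.any (fun w => PySem.Str.isIn w (PySem.Str.lower content)) := by
  rcases h : ws.any (fun w => PySem.Str.isIn w (PySem.Str.lower content)) with _ | _
  · rw [List.any_eq_false] at h
    rcases hc : (PySem.Set.contains
      ((List.range (PySem.Str.lower content).toList.length).foldl (fun acc i =>
        pvKeywords.foldl (fun a p =>
          if p.1.toList.isPrefixOf ((PySem.Str.lower content).toList.drop i) then PySem.Set.add a p.2 else a) acc)
        PySem.Set.empty) l) with _ | _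
    · exact hc
    · exfalso
      rcases (pv_found_label content l).mp hc with ⟨p, hp, hpl, hin⟩
      have hw : PySem.Str.isIn p.1 (PySem.Str.lower content) = false :=
        Bool.eq_false_iff.mpr (h p.1 (h2 p hp hpl))
      rw [pv_str_isIn] at hw
      rw [hw] at hin
      exact Bool.false_ne_true hin
  · rw [List.any_eq_true] at h
    rcases h with ⟨w, hw, hin⟩
    apply (pv_found_label content l).mpr
    refine ⟨(w, l), h1 w hw, rfl, ?_⟩
    rw [pv_str_isIn] at hin
    exact hin

-- ===== VERDICT (by name: the statement is the Claim_ definition above) =====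
set_option maxHeartbeats 1600000 in
theorem template_convert_py_spec : Claim_equal_template_convert_py := by
  intro content tags _
  unfold Spec_template_convert_py
  simp only [template_convert_py, template_convert_py_alt, List.find?]
  simp only [pv_label_eq content "challenger" ["stop", "don't", "wrong", "most people"] (by decide) (by decide),
      pv_label_eq content "architect" ["build", "create", "system", "framework"] (by decide) (by decide),
      pv_label_eq content "steward" ["protect", "care", "serve", "help"] (by decide) (by decide),
      pv_label_eq content "list" ["top", "best", "worst", "5 ", "3 ", "10 "] (by decide) (by decide),
      pv_label_eq content "how_to" ["how to", "how do", "step"] (by decide) (by decide)]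
  by_cases hA : (["stop", "don't", "wrong", "most people"].any (fun w => PySem.Str.isIn w (PySem.Str.lower content))) = true <;>
  by_cases hB : (["build", "create", "system", "framework"].any (fun w => PySem.Str.isIn w (PySem.Str.lower content))) = true <;>
  by_cases hC : (["protect", "care", "serve", "help"].any (fun w => PySem.Str.isIn w (PySem.Str.lower content))) = true <;>
  by_cases hQ : (PySem.Str.isIn "?" content) = true <;>
  by_cases hL : (["top", "best", "worst", "5 ", "3 ", "10 "].any (fun w => PySem.Str.isIn w (PySem.Str.lower content))) = true <;>
  by_cases hH : (["how to", "how do", "step"].any (fun w => PySem.Str.isIn w (PySem.Str.lower content))) = true <;>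
  (simp only [hA, hB, hC, hQ, hL, hH]; rfl)
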